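-- pv_equiv track=rewrite | github.com/AndrewLishchenko/Main | labs109.py | create_zigzag
-- ===== SOURCE A (Python) =====
-- def create_zigzag(rows, cols, start = 1):
--     sides,final=[],[]
--     count=start
--
--     for x in range(rows):
--
--         if x%2==0:
--             for y in range(cols):
--                 sides.append(count)
--                 count+=1
--         else:
--             for y in range(count+cols-1,count-1,-1):
--                 sides.append(y)
--                 count+=1
--
--         final.append(sides)
--         sides=[]
--
--     return(final)
-- ===== SOURCE B (Python) =====
-- def create_zigzag(rows, cols, start=1):
--     n = max(cols, 0)
--     m = max(rows, 0)
--     flat = range(start, start + m * n)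
--     out = []
--     for i in range(m):
--         row = list(flat[i * n:(i + 1) * n])
--         out.append(row[::-1] if i % 2 == 1 else row)
--     return out
-- ===== Notes on version B (the rewrite author's own statement) =====
-- stated objective: simpler
-- what changed: B builds the whole flat sequence once with range and slices it into rows, reversing the odd-indexed slices, instead of A's running counter with a manual countdown range per odd row.
import Mathlib
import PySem

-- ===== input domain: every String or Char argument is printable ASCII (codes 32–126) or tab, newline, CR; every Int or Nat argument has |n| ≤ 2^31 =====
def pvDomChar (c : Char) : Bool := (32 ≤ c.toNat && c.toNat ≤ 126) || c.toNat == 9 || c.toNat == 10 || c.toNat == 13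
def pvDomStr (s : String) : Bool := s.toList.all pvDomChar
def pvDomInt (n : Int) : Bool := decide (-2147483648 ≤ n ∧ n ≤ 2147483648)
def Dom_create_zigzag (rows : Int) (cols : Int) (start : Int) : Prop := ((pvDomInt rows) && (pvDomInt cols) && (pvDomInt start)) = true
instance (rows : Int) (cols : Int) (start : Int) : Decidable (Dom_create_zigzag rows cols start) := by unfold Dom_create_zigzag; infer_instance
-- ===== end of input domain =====

-- B builds the whole flat sequence once and slices it into rows (reversing the odd-indexed
-- slices) instead of A's running counter with a per-row countdown range; objective: simpler.

-- ===== PORT A =====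
def create_zigzag (rows : Int) (cols : Int) (start : Int) : List (List Int) :=
  -- sides=[], final=[], count=start; for x in range(rows): …
  let st :=
    (PySem.List.pyRange 0 rows 1).foldl
      (fun (st : Int × List (List Int)) (x : Int) =>
        let count := st.1
        let final := st.2
        let p :=
          if x % 2 == 0 then
            -- for y in range(cols): sides.append(count); count += 1
            (PySem.List.pyRange 0 cols 1).foldl
              (fun (s : List Int × Int) (_ : Int) => (s.1 ++ [s.2], s.2 + 1)) ([], count)
          else
            -- for y in range(count+cols-1, count-1, -1): sides.append(y); count += 1
            (PySem.List.pyRange (count + cols - 1) (count - 1) (-1)).foldl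
              (fun (s : List Int × Int) (y : Int) => (s.1 ++ [y], s.2 + 1)) ([], count)
        (p.2, final ++ [p.1]))
      (start, [])
  st.2

-- ===== PORT B =====
def create_zigzag_alt (rows : Int) (cols : Int) (start : Int) : List (List Int) :=
  let n := max cols 0
  let m := max rows 0
  let flat := PySem.List.pyRange start (start + m * n) 1
  (PySem.List.pyRange 0 m 1).foldl
    (fun (out : List (List Int)) (i : Int) =>
      out ++ [(let row := PySem.List.slice flat (some (i * n)) (some ((i + 1) * n));
               if i % 2 == 1 then row.reverse else row)])
    []

-- ===== PRECONDITION & SPEC =====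
def Spec_create_zigzag (rows : Int) (cols : Int) (start : Int) (out : List (List Int)) : Prop := out = create_zigzag_alt rows cols start
instance (rows : Int) (cols : Int) (start : Int) (out : List (List Int)) : Decidable (Spec_create_zigzag rows cols start out) := by unfold Spec_create_zigzag; infer_instance

-- ===== CLAIM (what is proved, stated in full; the proofs are below) =====
def Claim_equal_create_zigzag : Prop := ∀ (rows : Int) (cols : Int) (start : Int), Dom_create_zigzag rows cols start → Spec_create_zigzag rows cols start (create_zigzag rows cols start)

-- ===== LEMMAS AND PROOFS =====

/-- the arithmetic row c, c+1, …, c+n-1 -/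
def zzRow (n : Nat) (c : Int) : List Int := (List.range n).map (fun (j : Nat) => c + (j : Int))

theorem zzRow_succ (n : Nat) (c : Int) : zzRow (n + 1) c = c :: zzRow n (c + 1) := by
  unfold zzRow
  rw [List.range_succ_eq_map, List.map_cons, List.map_map]
  refine congrArg₂ _ (by simp) (List.map_congr_left fun j _ => ?_)
  simp only [Function.comp_apply]
  push_cast
  ring

theorem pyRange_one_eq_zzRow (a b : Int) :
    PySem.List.pyRange a b 1 = zzRow (b - a).toNat a := by
  rw [PySem.List.pyRange_one]; rfl

theorem A_inner_even (l : List Int) (sides : List Int) (c : Int) :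
    l.foldl (fun (s : List Int × Int) (_ : Int) => (s.1 ++ [s.2], s.2 + 1)) (sides, c)
      = (sides ++ zzRow l.length c, c + l.length) := by
  induction l generalizing sides c with
  | nil => simp [zzRow]
  | cons h t ih =>
      simp only [List.foldl_cons, ih, List.length_cons, zzRow_succ]
      rw [Prod.mk.injEq]
      constructor
      · simp
      · push_cast; ring

theorem A_inner_odd (l : List Int) (sides : List Int) (c : Int) :
    l.foldl (fun (s : List Int × Int) (y : Int) => (s.1 ++ [y], s.2 + 1)) (sides, c)
      = (sides ++ l, c + l.length) := by
  induction l generalizing sides c with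
  | nil => simp
  | cons h t ih =>
      simp only [List.foldl_cons, ih, List.length_cons]
      rw [Prod.mk.injEq]
      constructor
      · simp
      · push_cast; ring

theorem pyRange_drop (k : Nat) (a b : Int) :
    (PySem.List.pyRange a b 1).drop k = PySem.List.pyRange (a + k) b 1 := by
  induction k generalizing a with
  | zero => simp
  | succ k ih =>
      by_cases h : a < b
      · rw [PySem.List.pyRange_one_cons h, List.drop_succ_cons, ih (a + 1)]
        congr 1
        push_cast
        ring
      · rw [PySem.List.pyRange_one_eq_nil (by omega : b ≤ a),
            PySem.List.pyRange_one_eq_nil (by push_cast; omega : b ≤ a + ((k : Nat) + 1 : Nat))]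
        simp

theorem pyRange_take (k : Nat) (a b : Int) :
    (PySem.List.pyRange a b 1).take k = PySem.List.pyRange a (min (a + k) b) 1 := by
  induction k generalizing a with
  | zero =>
      rw [List.take_zero, PySem.List.pyRange_one_eq_nil (by simp)]
  | succ k ih =>
      by_cases h : a < b
      · rw [PySem.List.pyRange_one_cons h,
            PySem.List.pyRange_one_cons (by push_cast; omega : a < min (a + ((k : Nat) + 1 : Nat)) b),
            List.take_succ_cons, ih (a + 1)]
        congr 2
        push_cast
        omega
      · rw [PySem.List.pyRange_one_eq_nil (by omega : b ≤ a),
            PySem.List.pyRange_one_eq_nil (by push_cast; omega : min (a + ((k : Nat) + 1 : Nat)) b ≤ a)]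
        simp

/-- the zigzag result both programs compute -/
def zigzag (m n : Nat) (start : Int) : List (List Int) :=
  (List.range m).map (fun (i : Nat) =>
    if i % 2 = 0 then zzRow n (start + (i : Int) * n) else (zzRow n (start + (i : Int) * n)).reverse)

theorem zzRow_length (n : Nat) (c : Int) : (zzRow n c).length = n := by simp [zzRow]

theorem parity_int0 (m : Nat) :
    (((m : Int) % 2 == (0 : Int)) : Bool) = decide (m % 2 = 0) := by
  have h2 : (m : Int) % 2 = ((m % 2 : Nat) : Int) := by omega
  rcases Nat.mod_two_eq_zero_or_one m with h | h <;> rw [Bool.eq_iff_iff] <;> simp [h2, h]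

theorem parity_int1 (m : Nat) :
    (((m : Int) % 2 == (1 : Int)) : Bool) = decide (m % 2 = 1) := by
  have h2 : (m : Int) % 2 = ((m % 2 : Nat) : Int) := by omega
  rcases Nat.mod_two_eq_zero_or_one m with h | h <;> rw [Bool.eq_iff_iff] <;> simp [h2, h]

theorem A_loop (m : Nat) (cols start : Int) :
    (List.range m).foldl
      (fun (st : Int × List (List Int)) (k : Nat) =>
        let count := st.1
        let final := st.2
        let p :=
          if (k : Int) % 2 == 0 then
            (PySem.List.pyRange 0 cols 1).foldl
              (fun (s : List Int × Int) (_ : Int) => (s.1 ++ [s.2], s.2 + 1)) ([], count)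
          else
            (PySem.List.pyRange (count + cols - 1) (count - 1) (-1)).foldl
              (fun (s : List Int × Int) (y : Int) => (s.1 ++ [y], s.2 + 1)) ([], count)
        (p.2, final ++ [p.1]))
      (start, [])
      = (start + m * cols.toNat, zigzag m cols.toNat start) := by
  induction m with
  | zero => simp [zigzag]
  | succ m ih =>
      have hc : True := trivial
      simp only [List.range_succ, List.foldl_append, ih, List.foldl_cons, List.foldl_nil]
      set c : Int := start + m * cols.toNat with hc'
      have heven : (PySem.List.pyRange 0 cols 1).foldl
          (fun (s : List Int × Int) (_ : Int) => (s.1 ++ [s.2], s.2 + 1)) ([], c)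
          = (zzRow cols.toNat c, c + cols.toNat) := by
        rw [A_inner_even]
        simp [PySem.List.length_pyRange_one]
      have hcountdown : PySem.List.pyRange (c + cols - 1) (c - 1) (-1)
          = (zzRow cols.toNat c).reverse := by
        rw [PySem.List.pyRange_neg_one_eq_reverse]
        have h1 : c - 1 + 1 = c := by ring
        have h2 : c + cols - 1 + 1 = c + cols := by ring
        rw [h1, h2, pyRange_one_eq_zzRow]
        congr 2
        omega
      have hodd : (PySem.List.pyRange (c + cols - 1) (c - 1) (-1)).foldl
          (fun (s : List Int × Int) (y : Int) => (s.1 ++ [y], s.2 + 1)) ([], c)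
          = ((zzRow cols.toNat c).reverse, c + cols.toNat) := by
        rw [hcountdown, A_inner_odd]
        simp [zzRow_length]
      rw [parity_int0 m]
      by_cases hm : m % 2 = 0
      · simp only [hm, decide_true, if_true, heven]
        rw [Prod.mk.injEq]
        constructor
        · rw [hc']; push_cast; ring
        · simp [zigzag, List.range_succ, hc']
          intro h
          exact absurd h (by omega)
      · simp only [hm, decide_false, hodd]
        rw [Prod.mk.injEq]
        constructor
        · rw [hc']; push_cast; ring
        · simp [zigzag, List.range_succ, hc']
          intro h
          exact absurd h (by omega)

theorem foldl_append_map {α β : Type} (l : List α) (acc : List β) (g : α → β) :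
    l.foldl (fun out i => out ++ [g i]) acc = acc ++ l.map g := by
  induction l generalizing acc with
  | nil => simp
  | cons h t ih => simp [ih]

theorem B_row (m n i : Nat) (start : Int) (hi : i < m) :
    PySem.List.slice (PySem.List.pyRange start (start + (m : Int) * n) 1)
      (some ((i : Int) * n)) (some (((i : Int) + 1) * n))
      = zzRow n (start + i * n) := by
  have h1 : ((i : Int) * n) = ((i * n : Nat) : Int) := by push_cast; ring
  have h2 : (((i : Int) + 1) * n) = (((i + 1) * n : Nat) : Int) := by push_cast; ring
  rw [h1, h2, PySem.List.slice_natCast, pyRange_drop]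
  have h3 : (i + 1) * n - i * n = n := by
    rw [Nat.add_mul, Nat.one_mul, Nat.add_sub_cancel_left]
  rw [h3, pyRange_take]
  have h5 : i * n + n ≤ m * n := by
    calc i * n + n = (i + 1) * n := by rw [Nat.add_mul, Nat.one_mul]
    _ ≤ m * n := Nat.mul_le_mul_right n hi
  have h6 : ((i * n : Nat) : Int) + n ≤ (m : Int) * n := by
    have := Int.ofNat_le.mpr h5
    push_cast at this ⊢
    linarith
  have h4 : min (start + ((i * n : Nat) : Int) + (n : Int)) (start + (m : Int) * n)
      = start + ((i * n : Nat) : Int) + n := by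
    rw [min_eq_left]
    linarith
  rw [h4, pyRange_one_eq_zzRow,
      show start + ((i * n : Nat) : Int) + (n : Int) - (start + ((i * n : Nat) : Int)) = ((n : Nat) : Int) from by ring,
      Int.toNat_natCast,
      show start + ((i * n : Nat) : Int) = start + (i : Int) * n from by push_cast; ring]

theorem B_eq (rows cols start : Int) :
    create_zigzag_alt rows cols start = zigzag rows.toNat cols.toNat start := by
  unfold create_zigzag_alt
  dsimp only
  have hm : max rows 0 = (rows.toNat : Int) := (Int.toNat_eq_max rows).symm
  have hn : max cols 0 = (cols.toNat : Int) := (Int.toNat_eq_max cols).symm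
  simp only [hm, hn]
  rw [show PySem.List.pyRange 0 (rows.toNat : Int) 1
        = (List.range rows.toNat).map (fun (k : Nat) => (k : Int)) from by
      rw [PySem.List.pyRange_one]; simp; congr 2; omega]
  rw [List.foldl_map]
  rw [foldl_append_map, List.nil_append]
  unfold zigzag
  apply List.map_congr_left
  intro i hi
  rw [List.mem_range] at hi
  rw [B_row rows.toNat cols.toNat i start hi]
  rw [parity_int1 i]
  rcases Nat.mod_two_eq_zero_or_one i with h | h <;> simp [h]

theorem A_eq (rows cols start : Int) :
    create_zigzag rows cols start = zigzag rows.toNat cols.toNat start := by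
  unfold create_zigzag
  dsimp only
  rw [show PySem.List.pyRange 0 rows 1
        = (List.range rows.toNat).map (fun (k : Nat) => (k : Int)) from by
      rw [PySem.List.pyRange_one]; simp]
  rw [List.foldl_map]
  rw [A_loop]

-- ===== VERDICT (by name: the statement is the Claim_ definition above) =====
theorem create_zigzag_spec : Claim_equal_create_zigzag := by
  intro rows cols start _
  unfold Spec_create_zigzag
  rw [A_eq, B_eq]
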